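-- pv_equiv track=rewrite | github.com/anmaletic/PMA-Code | Labosi/06/Zadatak_02.py | makniGetNajvece
-- ===== SOURCE A (Python) =====
-- def makniGetNajvece(lista:list, n:int):
--     tempLista = list(lista)
--     while n > 0:
--         m = max(tempLista)
--         try:
--             while True:
--                 tempLista.remove(m)
--         except:
--             pass
--         n -= 1
--     return tempLista
-- ===== SOURCE B (Python) =====
-- def makniGetNajvece(lista: list, n: int):
--     if n <= 0:
--         return list(lista)
--     prag = sorted(set(lista))[-n]
--     return [x for x in lista if x < prag]
-- ===== Notes on version B (the rewrite author's own statement) =====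
-- stated objective: faster
-- what changed: Instead of repeatedly scanning for the max and removing all its occurrences n times, B sorts the distinct values once, reads the n-th largest as a threshold, and filters the list in one pass.
import Mathlib
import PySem

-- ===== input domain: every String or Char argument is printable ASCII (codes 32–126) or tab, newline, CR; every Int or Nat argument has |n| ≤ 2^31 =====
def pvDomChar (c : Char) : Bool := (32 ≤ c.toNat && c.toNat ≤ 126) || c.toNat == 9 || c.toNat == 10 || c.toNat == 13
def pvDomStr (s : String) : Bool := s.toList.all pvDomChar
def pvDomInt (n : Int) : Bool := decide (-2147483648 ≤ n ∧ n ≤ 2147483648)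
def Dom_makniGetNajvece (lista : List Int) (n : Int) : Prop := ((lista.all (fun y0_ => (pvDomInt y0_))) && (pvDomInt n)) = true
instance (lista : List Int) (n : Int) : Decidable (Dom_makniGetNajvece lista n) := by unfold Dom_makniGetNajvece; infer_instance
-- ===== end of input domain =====

-- B replaces A's n-fold max-scan-and-remove loop by one sort of the distinct values, a
-- threshold lookup and a single filter pass (measured faster, asymptotically).

-- ===== PORT A =====
-- 'try: while True: tempLista.remove(m) except: pass' — remove m until ValueError stops it
def pyRemoveAllA (t : List Int) (m : Int) : List Int :=
  match h : PySem.List.remove? t m with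
  | none => t
  | some t' => pyRemoveAllA t' m
termination_by t.length
decreasing_by
  have hm : m ∈ t := by
    by_contra hnm
    rw [(PySem.List.remove?_eq_none_iff t m).2 hnm] at h
    simp at h
  rw [PySem.List.remove?_eq_some_erase t m hm] at h
  cases h
  have := List.length_erase_of_mem hm
  have : 1 ≤ t.length := List.length_pos_of_mem hm
  omega

-- 'while n > 0: m = max(tempLista); <remove all m>; n -= 1'
def loopA (t : List Int) (n : Int) : List Int :=
  if 0 < n then
    match PySem.List.max? t (fun x => x) with
    | none => t     -- Python raises ValueError (max of empty list) here: outside Pre_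
    | some m => loopA (pyRemoveAllA t m) (n - 1)
  else t
termination_by n.toNat
decreasing_by omega

def makniGetNajvece (lista : List Int) (n : Int) : List Int := loopA lista n

-- ===== PORT B =====
def makniGetNajvece_alt (lista : List Int) (n : Int) : List Int :=
  if n ≤ 0 then lista
  else
    match PySem.List.pyGet? (PySem.List.sorted (PySem.Set.ofList lista) (fun x => x) false) (-n) with
    | none => []    -- Python raises IndexError here (n > number of distinct values): outside Pre_
    | some prag => lista.filter (fun x => decide (x < prag))

-- ===== PRECONDITION & SPEC =====
-- Pre_ excludes exactly the inputs where A raises: 0 < n with fewer than n distinct values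
-- (A's max() eventually hits the emptied list and raises ValueError; B raises IndexError there too).
def Pre_makniGetNajvece (lista : List Int) (n : Int) : Prop :=
  n ≤ 0 ∨ n ≤ ((PySem.Set.ofList lista).length : Int)
instance (lista : List Int) (n : Int) : Decidable (Pre_makniGetNajvece lista n) := by
  unfold Pre_makniGetNajvece; infer_instance

def pvWitness_makniGetNajvece : List Int × Int := ([3, 1, 2, 1], 2)

def Spec_makniGetNajvece (lista : List Int) (n : Int) (out : List Int) : Prop := out = makniGetNajvece_alt lista n
instance (lista : List Int) (n : Int) (out : List Int) : Decidable (Spec_makniGetNajvece lista n out) := by unfold Spec_makniGetNajvece; infer_instance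

-- ===== CLAIM (what is proved, stated in full; the proofs are below) =====
def Claim_equal_makniGetNajvece : Prop := ∀ (lista : List Int) (n : Int), Dom_makniGetNajvece lista n → Pre_makniGetNajvece lista n → Spec_makniGetNajvece lista n (makniGetNajvece lista n)

-- ===== LEMMAS AND PROOFS =====

-- number of DISTINCT values of t strictly greater than x
def cdg (t : List Int) (x : Int) : Nat :=
  (PySem.Set.ofList t).countP (fun y => decide (x < y))

lemma pyRemoveAllA_eq_filter (t : List Int) (m : Int) :
    pyRemoveAllA t m = t.filter (fun x => decide (x ≠ m)) := by
  rw [pyRemoveAllA]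
  split
  · next h =>
      have hnm : m ∉ t := (PySem.List.remove?_eq_none_iff t m).1 h
      symm
      rw [List.filter_eq_self]
      intro x hx
      simp only [decide_eq_true_eq]
      exact fun hxm => hnm (hxm ▸ hx)
  · next t' h =>
      have hm : m ∈ t := by
        by_contra hnm
        rw [(PySem.List.remove?_eq_none_iff t m).2 hnm] at h
        simp at h
      rw [PySem.List.remove?_eq_some_erase t m hm] at h
      cases h
      rw [pyRemoveAllA_eq_filter (t.erase m) m]
      rw [← List.erase_filter]
      rw [List.erase_of_not_mem]
      simp
termination_by t.length
decreasing_by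
  have := List.length_erase_of_mem hm
  have : 1 ≤ t.length := List.length_pos_of_mem hm
  omega

lemma loopA_eq_filter (k : Nat) :
    ∀ (t : List Int) (n : Int), n.toNat = k → k ≤ (PySem.Set.ofList t).length →
      loopA t n = t.filter (fun x => decide (k ≤ cdg t x)) := by
  induction k with
  | zero =>
      intro t n hn _
      rw [loopA, if_neg (by omega)]
      symm
      rw [List.filter_eq_self]
      intro x _
      simp
  | succ k ih =>
      intro t n hn hk
      have hD := PySem.Set.nodup_ofList t
      have htne : t ≠ [] := by
        intro he
        subst he
        simp [PySem.Set.ofList, PySem.Set.empty] at hk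
      obtain ⟨m, hmax⟩ : ∃ m, PySem.List.max? t (fun x => x) = some m := by
        cases hmx : PySem.List.max? t (fun x => x) with
        | none => exact absurd ((PySem.List.max?_eq_none_iff t _).1 hmx) htne
        | some m => exact ⟨m, rfl⟩
      have hm_mem : m ∈ t := PySem.List.max?_mem hmax
      have hm_max : ∀ y ∈ t, y ≤ m := PySem.List.max?_isMax hmax
      rw [loopA, if_pos (by omega), hmax]
      show loopA (pyRemoveAllA t m) (n - 1) = _
      rw [pyRemoveAllA_eq_filter]
      set t' := t.filter (fun x => decide (x ≠ m)) with ht'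
      have hmD : m ∈ PySem.Set.ofList t := (PySem.Set.mem_ofList t m).2 hm_mem
      have hperm : (PySem.Set.ofList t').Perm ((PySem.Set.ofList t).erase m) := by
        refine (List.perm_ext_iff_of_nodup (PySem.Set.nodup_ofList t') (hD.erase m)).2 ?_
        intro x
        rw [PySem.Set.mem_ofList, hD.mem_erase_iff, ht', List.mem_filter, PySem.Set.mem_ofList]
        simp only [decide_eq_true_eq]
        tauto
      have hlen' : (PySem.Set.ofList t').length + 1 = (PySem.Set.ofList t).length := by
        rw [hperm.length_eq, List.length_erase_of_mem hmD]
        have : 1 ≤ (PySem.Set.ofList t).length := List.length_pos_of_mem hmD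
        omega
      have hcdg : ∀ x : Int, x < m → cdg t x = cdg t' x + 1 := by
        intro x hx
        unfold cdg
        have h1 : ((PySem.Set.ofList t).countP (fun y => decide (x < y)))
            = ((m :: (PySem.Set.ofList t).erase m).countP (fun y => decide (x < y))) :=
          (List.perm_cons_erase hmD).countP_eq _
        rw [h1, List.countP_cons, hperm.countP_eq]
        simp [hx]
      have hcdgm : cdg t m = 0 := by
        unfold cdg
        rw [List.countP_eq_zero]
        intro y hy
        have : y ≤ m := hm_max y ((PySem.Set.mem_ofList t y).1 hy)
        simp
        omega
      rw [ih t' (n - 1) (by omega) (by omega)]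
      rw [ht', List.filter_filter]
      apply List.filter_congr
      intro x hx
      by_cases hxm : x = m
      · subst hxm
        simp [hcdgm]
      · have hxlt : x < m := lt_of_le_of_ne (hm_max x hx) hxm
        have := hcdg x hxlt
        have hne : decide (x ≠ m) = true := by simp [hxm]
        simp only [hne, Bool.and_true]
        simp only [decide_eq_decide]
        rw [← ht']
        omega

lemma threshold_iff (d : List Int)
    (hmono : ∀ (p q : Nat), (hpq : p ≤ q) → (hq : q < d.length) → d[p]'(by omega) ≤ d[q]'hq)
    (i : Nat) (hidx : i < d.length) (x : Int) :
    decide (x < d[i]'hidx) = decide (d.length - i ≤ d.countP (fun y => decide (x < y))) := by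
  have hsplit : d.countP (fun y => decide (x < y))
      = (d.take (i+1)).countP (fun y => decide (x < y)) + (d.drop (i+1)).countP (fun y => decide (x < y)) := by
    conv_lhs => rw [← List.take_append_drop (i+1) d]
    rw [List.countP_append]
  by_cases hlt : x < d[i]'hidx
  · -- every element of drop i satisfies the predicate: count ≥ length - i
    have hdropfull : (d.drop i).countP (fun y => decide (x < y)) = (d.drop i).length := by
      rw [List.countP_eq_length]
      intro y hy
      obtain ⟨j, hj, hje⟩ := List.mem_iff_getElem.1 hy
      have hjl : i + j < d.length := by rw [List.length_drop] at hj; omega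
      have hye : y = d[i + j]'hjl := by rw [← hje, List.getElem_drop]
      have hmo : d[i]'hidx ≤ d[i + j]'hjl := hmono i (i + j) (by omega) hjl
      simp only [decide_eq_true_eq]
      omega
    have hcount : d.length - i ≤ d.countP (fun y => decide (x < y)) := by
      conv_rhs => rw [← List.take_append_drop i d]
      rw [List.countP_append, hdropfull, List.length_drop]
      omega
    rw [decide_eq_true hlt, decide_eq_true hcount]
  · -- d[i] ≤ x: nothing in take (i+1) counts, so count < length - i
    have htakezero : (d.take (i+1)).countP (fun y => decide (x < y)) = 0 := by
      rw [List.countP_eq_zero]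
      intro y hy
      obtain ⟨j, hj, hje⟩ := List.mem_iff_getElem.1 hy
      have hjlt : j < d.length := by
        have := List.length_take_le (i+1) d
        omega
      have hye : y = d[j]'hjlt := by rw [← hje]; exact List.getElem_take
      have hmo : d[j]'hjlt ≤ d[i]'hidx := by
        apply hmono j i _ hidx
        rw [List.length_take] at hj
        omega
      simp only [decide_eq_true_eq]
      omega
    have hcount : ¬ (d.length - i ≤ d.countP (fun y => decide (x < y))) := by
      rw [hsplit, htakezero]
      have := List.countP_le_length (l := d.drop (i+1)) (p := fun y => decide (x < y))
      rw [List.length_drop] at this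
      omega
    rw [decide_eq_false hlt, decide_eq_false hcount]

-- ===== VERDICT (by name: the statement is the Claim_ definition above) =====
theorem makniGetNajvece_spec : Claim_equal_makniGetNajvece := by
  intro lista n _ hpre
  unfold Spec_makniGetNajvece makniGetNajvece makniGetNajvece_alt
  by_cases hn : n ≤ 0
  · rw [loopA, if_neg (by omega), if_pos hn]
  · have hpos : 0 < n := by omega
    have hL : n ≤ ((PySem.Set.ofList lista).length : Int) := by
      cases hpre with
      | inl h => omega
      | inr h => exact h
    rw [if_neg hn]
    set k := n.toNat with hkdef
    have hkpos : 0 < k := by omega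
    have hkle : k ≤ (PySem.Set.ofList lista).length := by omega
    set d := PySem.List.sorted (PySem.Set.ofList lista) (fun x => x) false with hd
    have hdlen : d.length = (PySem.Set.ofList lista).length :=
      (PySem.List.sorted_perm (PySem.Set.ofList lista) (fun x => x) false).length_eq
    have hkled : k ≤ d.length := by omega
    have hidx : d.length - k < d.length := by omega
    have hget : PySem.List.pyGet? d (-n) = some (d[d.length - k]'hidx) := by
      have h1 : PySem.List.pyGet? d (-(k : Int)) = d[d.length - k]? :=
        PySem.List.pyGet?_neg_natCast d k hkpos hkled
      have h2 : (-n : Int) = -(k : Int) := by omega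
      rw [h2, h1, List.getElem?_eq_getElem hidx]
    rw [hget]
    rw [loopA_eq_filter k lista n (by omega) hkle]
    apply List.filter_congr
    intro x _
    have hmono : ∀ (p q : Nat), (hpq : p ≤ q) → (hq : q < d.length) → d[p]'(by omega) ≤ d[q]'hq :=
      fun p q hpq hq => PySem.List.sorted_id_getElem_mono (PySem.Set.ofList lista) hpq hq
    have hth := threshold_iff d hmono (d.length - k) hidx x
    have hcdg : cdg lista x = d.countP (fun y => decide (x < y)) :=
      ((PySem.List.sorted_perm (PySem.Set.ofList lista) (fun x => x) false).countP_eq _).symm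
    rw [hth]
    have hkk : d.length - (d.length - k) = k := by omega
    rw [hkk, hcdg]
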